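-- pv_equiv track=rewrite | github.com/Juwei-Wang/Small-Games | Assignments/Assignment5/juweimodule.py | caculate_the_score
-- ===== SOURCE A (Python) =====
-- def get_the_falling_elimination_index(game_array):
--     index_together = []
--     for i in range(len(game_array)):
--         current_number = -1
--         count = 1
--         index = []
--         for k in range(len(game_array[0])):
--             if k == 0:
--                 current_number = game_array[i][k]
--                 index.append([i, k])
--             if k >= 1:
--                 if game_array[i][k] == current_number:
--                     count += 1
--                     index.append([i, k])
--                 else:
--                     current_number = game_array[i][k]
--                     count = 1
--                     index = []
--                     index.append([i, k])
--             if count == 3: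
--                 useful = True
--                 index_together = index_together + index
--             if count >= 4:
--                 index_together = index_together + [index[len(index) - 1]]
--
--     return index_together
--
-- def get_the_falling_elimination_index_2(game_array):
--     index_together = []
--     for i in range(len(game_array[0])):
--         current_number = -1
--         count = 1
--         index = []
--         for k in range(len(game_array)):
--             if k == 0:
--                 current_number = game_array[k][i]
--                 index.append([k, i])
--             if k >= 1:
--                 if game_array[k][i] == current_number:
--                     count += 1
--                     index.append([k, i])
--                 else:
--                     current_number = game_array[k][i]
--                     count = 1
--                     index = []
--                     index.append([k, i])
--             if count == 3:
--                 useful = True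
--                 index_together = index_together + index
--             if count >= 4:
--                 index_together = index_together + [index[len(index) - 1]]
--     return index_together
--
-- def caculate_the_score(game_array):
--     score = 0
--     for i in range(len(game_array)):
--         for j in range(len(game_array[0])):
--             if game_array[i][j] == -1:
--                 score += 1
--     index1 = get_the_falling_elimination_index(game_array)
--     index2 = get_the_falling_elimination_index_2(game_array)
--     intersection = False
--     for i in range(len(index1)):
--         for j in range(len(index2)):
--             if index1[i] == index2[j]:
--                 intersection = True
--     if intersection == True:
--         score = (score - 1) * 2
--     return score
-- ===== SOURCE B (Python) =====
-- def caculate_the_score(game_array):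
--     height = len(game_array)
--     width = len(game_array[0])
--
--     def in_triple(get, length, j):
--         # is position j covered by a window of three consecutive equal values?
--         for t in (j - 2, j - 1, j):
--             if 0 <= t and t + 2 < length:
--                 if get(t) == get(t + 1) == get(t + 2):
--                     return True
--         return False
--
--     score = 0
--     overlap = False
--     for i in range(height):
--         for j in range(width):
--             if game_array[i][j] == -1:
--                 score += 1
--             if (not overlap
--                     and in_triple(lambda t: game_array[i][t], width, j)
--                     and in_triple(lambda t: game_array[t][j], height, i)):
--                 overlap = True
--     if overlap:
--         return (score - 1) * 2
--     return score
-- ===== Notes on version B (the rewrite author's own statement) =====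
-- stated objective: faster
-- what changed: B drops A's run-detecting state machine, coordinate-list accumulators and quadratic intersection loop entirely: one pass over the cells tests each cell locally with a 3-cell stencil (is the cell covered by a window of three consecutive equal values, horizontally and vertically) to drive an overlap flag, counting -1 cells in the same pass; this removes the O(|index1|*|index2|) pairwise comparison of coordinate lists.
import Mathlib
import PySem

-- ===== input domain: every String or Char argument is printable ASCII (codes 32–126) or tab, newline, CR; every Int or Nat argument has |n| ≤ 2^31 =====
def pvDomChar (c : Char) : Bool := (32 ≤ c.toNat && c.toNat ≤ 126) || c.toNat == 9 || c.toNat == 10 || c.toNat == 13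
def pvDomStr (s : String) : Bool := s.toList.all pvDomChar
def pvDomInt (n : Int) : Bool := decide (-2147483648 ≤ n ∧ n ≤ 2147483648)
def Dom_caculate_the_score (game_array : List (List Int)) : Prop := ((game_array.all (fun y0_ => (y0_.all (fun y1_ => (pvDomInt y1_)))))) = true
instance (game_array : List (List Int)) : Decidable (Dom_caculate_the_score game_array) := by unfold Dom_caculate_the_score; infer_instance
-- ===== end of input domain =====

-- B replaces A's run-detecting state machine, its coordinate-list accumulators and its quadratic
-- intersection loop by a single pass over the cells with a local 3-cell stencil test (horizontal
-- and vertical) driving an overlap flag, counting -1 cells in the same pass (objective: faster —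
-- a timing run measured it; A's intersection loop is quadratic in the collected coordinates).

-- ===== PORT A =====
-- one iteration of the inner k-loop shared by both helpers (a = game_array[..][..], c = the coord pair, st = (current_number, count, index, index_together))
def pvBodyA (a : Int) (c : Int × Int) (k : Int)
    (st : Int × Int × List (Int × Int) × List (Int × Int)) :
    Int × Int × List (Int × Int) × List (Int × Int) :=
  let st := if k == 0 then (a, st.2.1, st.2.2.1 ++ [c], st.2.2.2) else st
  let st := if 1 ≤ k then
      (if a == st.1 then (st.1, st.2.1 + 1, st.2.2.1 ++ [c], st.2.2.2)
       else (a, 1, [c], st.2.2.2))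
    else st
  let st := if st.2.1 == 3 then (st.1, st.2.1, st.2.2.1, st.2.2.2 ++ st.2.2.1) else st
  if 4 ≤ st.2.1 then
    (st.1, st.2.1, st.2.2.1,
     st.2.2.2 ++ [PySem.List.pyGetD st.2.2.1 (PySem.List.len st.2.2.1 - 1) (0, 0)])
  else st

def get_the_falling_elimination_index (game_array : List (List Int)) : List (Int × Int) :=
  (PySem.List.pyRange 0 (PySem.List.len game_array) 1).foldl
    (fun indexTogether i =>
      ((PySem.List.pyRange 0 (PySem.List.len (PySem.List.pyGetD game_array 0 [])) 1).foldl
        (fun st k =>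
          pvBodyA (PySem.List.pyGetD (PySem.List.pyGetD game_array i []) k 0) (i, k) k st)
        (-1, 1, [], indexTogether)).2.2.2)
    []

def get_the_falling_elimination_index_2 (game_array : List (List Int)) : List (Int × Int) :=
  (PySem.List.pyRange 0 (PySem.List.len (PySem.List.pyGetD game_array 0 [])) 1).foldl
    (fun indexTogether i =>
      ((PySem.List.pyRange 0 (PySem.List.len game_array) 1).foldl
        (fun st k =>
          pvBodyA (PySem.List.pyGetD (PySem.List.pyGetD game_array k []) i 0) (k, i) k st)
        (-1, 1, [], indexTogether)).2.2.2)
    []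

def caculate_the_score (game_array : List (List Int)) : Int :=
  let score :=
    (PySem.List.pyRange 0 (PySem.List.len game_array) 1).foldl
      (fun score i =>
        (PySem.List.pyRange 0 (PySem.List.len (PySem.List.pyGetD game_array 0 [])) 1).foldl
          (fun score j =>
            if PySem.List.pyGetD (PySem.List.pyGetD game_array i []) j 0 == -1 then score + 1
            else score)
          score)
      0
  let index1 := get_the_falling_elimination_index game_array
  let index2 := get_the_falling_elimination_index_2 game_array
  let intersection :=
    (PySem.List.pyRange 0 (PySem.List.len index1) 1).foldl
      (fun fl i =>
        (PySem.List.pyRange 0 (PySem.List.len index2) 1).foldl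
          (fun fl j =>
            if PySem.List.pyGetD index1 i (0, 0) == PySem.List.pyGetD index2 j (0, 0) then true
            else fl)
          fl)
      false
  if intersection then (score - 1) * 2 else score

-- ===== PORT B =====
-- Source B's in_triple: the for-loop over (j-2, j-1, j) with an early 'return True' is .any over that
-- three-element list; Python's chained a == b == c is (a == b) && (b == c)
def pvInTriple (get : Int → Int) (length : Int) (j : Int) : Bool :=
  [j - 2, j - 1, j].any (fun t =>
    decide (0 ≤ t) && decide (t + 2 < length) &&
    (get t == get (t + 1) && get (t + 1) == get (t + 2)))

def caculate_the_score_alt (game_array : List (List Int)) : Int :=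
  let height := PySem.List.len game_array
  let width := PySem.List.len (PySem.List.pyGetD game_array 0 [])
  let res :=
    (PySem.List.pyRange 0 height 1).foldl
      (fun (st : Int × Bool) i =>
        (PySem.List.pyRange 0 width 1).foldl
          (fun (st : Int × Bool) j =>
            let st := if PySem.List.pyGetD (PySem.List.pyGetD game_array i []) j 0 == -1
              then (st.1 + 1, st.2) else st
            if !st.2
                && pvInTriple (fun t => PySem.List.pyGetD (PySem.List.pyGetD game_array i []) t 0) width j
                && pvInTriple (fun t => PySem.List.pyGetD (PySem.List.pyGetD game_array t []) j 0) height i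
            then (st.1, true) else st)
          st)
      ((0 : Int), false)
  if res.2 then (res.1 - 1) * 2 else res.1

-- ===== PRECONDITION & SPEC =====
-- Pre_ excludes exactly the inputs where Python A raises IndexError: the empty grid
-- (helper 2 evaluates len(game_array[0]) unconditionally) and grids with a row shorter
-- than row 0 (every row is indexed up to len(game_array[0]) - 1).
def Pre_caculate_the_score (game_array : List (List Int)) : Prop :=
  game_array ≠ [] ∧ ∀ row ∈ game_array, (PySem.List.pyGetD game_array 0 []).length ≤ row.length
instance (game_array : List (List Int)) : Decidable (Pre_caculate_the_score game_array) := by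
  unfold Pre_caculate_the_score; infer_instance

def pvWitness_caculate_the_score : List (List Int) := [[-1, -1, -1], [0, 1, 2], [0, 3, 4]]

def Spec_caculate_the_score (game_array : List (List Int)) (out : Int) : Prop := out = caculate_the_score_alt game_array
instance (game_array : List (List Int)) (out : Int) : Decidable (Spec_caculate_the_score game_array out) := by unfold Spec_caculate_the_score; infer_instance

-- ===== CLAIM (what is proved, stated in full; the proofs are below) =====
def Claim_equal_caculate_the_score : Prop := ∀ (game_array : List (List Int)), Dom_caculate_the_score game_array → Pre_caculate_the_score game_array → Spec_caculate_the_score game_array (caculate_the_score game_array)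

-- ===== LEMMAS AND PROOFS =====
-- the semantic step of A's inner loop for k >= 1
def pvStep (st : Int × Int × List (Int × Int) × List (Int × Int)) (p : Int × (Int × Int)) :
    Int × Int × List (Int × Int) × List (Int × Int) :=
  let st := if p.1 == st.1 then (st.1, st.2.1 + 1, st.2.2.1 ++ [p.2], st.2.2.2)
            else (p.1, 1, [p.2], st.2.2.2)
  let st := if st.2.1 == 3 then (st.1, st.2.1, st.2.2.1, st.2.2.2 ++ st.2.2.1) else st
  if 4 ≤ st.2.1 then
    (st.1, st.2.1, st.2.2.1,
     st.2.2.2 ++ [PySem.List.pyGetD st.2.2.1 (PySem.List.len st.2.2.1 - 1) (0, 0)])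
  else st

-- A's whole inner loop over a (value, coord) sequence
def pvFoldA : List (Int × (Int × Int)) → List (Int × Int) → Int × Int × List (Int × Int) × List (Int × Int)
  | [], acc => (-1, 1, [], acc)
  | p :: rest, acc => rest.foldl pvStep (p.1, 1, [p.2], acc)

-- proof-side run collector: the cells of all maximal runs of >= 3 equal consecutive values
def run_cells : List (Int × (Int × Int)) → PySem.Set (Int × Int)
  | [] => PySem.Set.empty
  | p :: rest =>
    let run := rest.takeWhile (fun q => q.1 == p.1)
    let rest' := rest.dropWhile (fun q => q.1 == p.1)
    let cells := run_cells rest'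
    if 3 ≤ run.length + 1 then PySem.Set.update cells ((p :: run).map (·.2)) else cells
  termination_by l => l.length
  decreasing_by
    simpa using Nat.lt_succ_of_le (List.length_dropWhile_le (fun q => q.1 == p.1) rest)

def pvRowPairs (g : List (List Int)) (i : Int) : List (Int × (Int × Int)) :=
  (PySem.List.pyRange 0 (PySem.List.len (PySem.List.pyGetD g 0 [])) 1).map
    (fun k => (PySem.List.pyGetD (PySem.List.pyGetD g i []) k 0, (i, k)))

def pvColPairs (g : List (List Int)) (k : Int) : List (Int × (Int × Int)) :=
  (PySem.List.pyRange 0 (PySem.List.len g) 1).map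
    (fun i => (PySem.List.pyGetD (PySem.List.pyGetD g i []) k 0, (i, k)))

-- position j of the sequence is covered by a window of three consecutive equal values
def pvWin (l : List (Int × (Int × Int))) (j : Nat) : Prop :=
  ∃ t, t ≤ j ∧ j ≤ t + 2 ∧ t + 2 < l.length ∧
    (l.getD t (0, (0, 0))).1 = (l.getD (t + 1) (0, (0, 0))).1 ∧
    (l.getD (t + 1) (0, (0, 0))).1 = (l.getD (t + 2) (0, (0, 0))).1

theorem pvBodyA_pos (a : Int) (c : Int × Int) (k : Int)
    (st : Int × Int × List (Int × Int) × List (Int × Int)) (h : 1 ≤ k) :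
    pvBodyA a c k st = pvStep st (a, c) := by
  have h0 : (k == (0 : Int)) = false := by
    simp only [beq_eq_false_iff_ne, ne_eq]; omega
  simp only [pvBodyA, pvStep, h0, Bool.false_eq_true, if_false, if_pos h]

theorem pv_innerA (m : Int) (vf : Int → Int) (cf : Int → Int × Int) (acc : List (Int × Int)) :
    (PySem.List.pyRange 0 m 1).foldl (fun st k => pvBodyA (vf k) (cf k) k st) (-1, 1, [], acc)
      = pvFoldA ((PySem.List.pyRange 0 m 1).map (fun k => (vf k, cf k))) acc := by
  by_cases hm : 0 < m
  · rw [PySem.List.pyRange_one_cons hm]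
    simp only [List.foldl_cons, List.map_cons]
    have h0 : pvBodyA (vf 0) (cf 0) 0 (-1, 1, [], acc) = (vf 0, 1, [cf 0], acc) := by
      simp [pvBodyA]
    rw [h0]
    show List.foldl _ _ _
        = ((PySem.List.pyRange (0 + 1) m 1).map (fun k => (vf k, cf k))).foldl pvStep
            (vf 0, 1, [cf 0], acc)
    rw [List.foldl_map]
    refine PySem.List.foldl_congr_mem _ _ _ _ ?_
    intro st k hk
    have hk1 : 1 ≤ k := by
      have := (PySem.List.mem_pyRange_one.mp hk).1; omega
    exact pvBodyA_pos (vf k) (cf k) k st hk1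
  · rw [PySem.List.pyRange_one_eq_nil (by omega)]
    rfl

theorem pv_pyGetD_concat (l : List (Int × Int)) (a : Int × Int) (d : Int × Int) :
    PySem.List.pyGetD (l ++ [a]) (PySem.List.len (l ++ [a]) - 1) d = a := by
  have h1 : PySem.List.len (l ++ [a]) - 1 = ((l.length : Nat) : Int) := by
    simp [PySem.List.len_eq]
  rw [h1, PySem.List.pyGetD_natCast]
  simp [List.getD]

-- a run continued with count already ≥ 3: every step appends exactly the new coordinate
theorem pv_run_ge3 (ys : List (Int × (Int × Int))) :
    ∀ (v cnt : Int) (idx acc : List (Int × Int)),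
      (∀ q ∈ ys, q.1 = v) → 3 ≤ cnt → idx ≠ [] →
      ys.foldl pvStep (v, cnt, idx, acc)
        = (v, cnt + (ys.length : Int), idx ++ ys.map (·.2), acc ++ ys.map (·.2)) := by
  induction ys with
  | nil => intro v cnt idx acc _ _ _; simp
  | cons q ys ih =>
    intro v cnt idx acc hv h3 hidx
    have hq : q.1 = v := hv q (List.mem_cons_self ..)
    have hstep : pvStep (v, cnt, idx, acc) q = (v, cnt + 1, idx ++ [q.2], acc ++ [q.2]) := by
      have hbeq : (q.1 == v) = true := by simp [hq]
      have hne3 : ((cnt + 1) == (3 : Int)) = false := by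
        simp only [beq_eq_false_iff_ne, ne_eq]; omega
      simp only [pvStep, hbeq, if_true, hne3, Bool.false_eq_true, if_false,
        if_pos (by omega : (4 : Int) ≤ cnt + 1)]
      rw [pv_pyGetD_concat]
    simp only [List.foldl_cons, hstep]
    rw [ih v (cnt + 1) (idx ++ [q.2]) (acc ++ [q.2])
      (fun q' hq' => hv q' (List.mem_cons_of_mem _ hq')) (by omega) (by simp)]
    simp only [List.map_cons, List.length_cons, List.append_assoc, List.cons_append,
      List.nil_append, Prod.mk.injEq, true_and]
    exact ⟨by push_cast; ring, trivial⟩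

-- a fresh run: count starts at 1, index = [c]; appends all coordinates iff the run reaches length 3
theorem pv_run_fresh (run : List (Int × (Int × Int))) (v : Int) (c : Int × Int)
    (acc : List (Int × Int)) (hv : ∀ q ∈ run, q.1 = v) :
    run.foldl pvStep (v, 1, [c], acc)
      = (v, 1 + (run.length : Int), c :: run.map (·.2),
         acc ++ (if 2 ≤ run.length then c :: run.map (·.2) else [])) := by
  match run with
  | [] => simp
  | [q1] =>
    have h1 : q1.1 = v := hv q1 (by simp)
    have hb : (q1.1 == v) = true := by simp [h1]
    simp [pvStep, hb]
  | q1 :: q2 :: rs =>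
    have h1 : q1.1 = v := hv q1 (by simp)
    have h2 : q2.1 = v := hv q2 (by simp)
    have hstep1 : pvStep (v, 1, [c], acc) q1 = (v, 2, [c, q1.2], acc) := by
      have hb : (q1.1 == v) = true := by simp [h1]
      norm_num [pvStep, hb]
    have hstep2 : pvStep (v, 2, [c, q1.2], acc) q2
        = (v, 3, [c, q1.2, q2.2], acc ++ [c, q1.2, q2.2]) := by
      have hb : (q2.1 == v) = true := by simp [h2]
      norm_num [pvStep, hb]
    simp only [List.foldl_cons, hstep1, hstep2]
    rw [pv_run_ge3 rs v 3 [c, q1.2, q2.2] (acc ++ [c, q1.2, q2.2])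
      (fun q' hq' => hv q' (by simp [hq'])) (by omega) (by simp)]
    simp only [List.map_cons, List.length_cons, List.append_assoc, List.cons_append,
      List.nil_append, if_pos (by omega : 2 ≤ rs.length + 1 + 1), Prod.mk.injEq, true_and]
    exact ⟨by push_cast; ring, trivial⟩

-- membership in A's accumulated index list = membership in run_cells, plus the incoming acc
theorem pv_mem_foldA (n : Nat) :
    ∀ (ps : List (Int × (Int × Int))), ps.length ≤ n →
    ∀ (acc : List (Int × Int)) (x : Int × Int),
      (x ∈ (pvFoldA ps acc).2.2.2 ↔ x ∈ acc ∨ x ∈ run_cells ps) := by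
  induction n with
  | zero =>
    intro ps hps acc x
    have : ps = [] := List.eq_nil_of_length_eq_zero (by omega)
    subst this
    simp [pvFoldA, run_cells, PySem.Set.empty]
  | succ n ih =>
    intro ps hps acc x
    match ps with
    | [] => simp [pvFoldA, run_cells, PySem.Set.empty]
    | p :: rest =>
      set run := rest.takeWhile (fun q => q.1 == p.1) with hrun
      set rest' := rest.dropWhile (fun q => q.1 == p.1) with hrest'
      have hsplit : rest = run ++ rest' := (List.takeWhile_append_dropWhile).symm
      have hvrun : ∀ q ∈ run, q.1 = p.1 := by
        intro q hq
        have := List.mem_takeWhile_imp (hrun ▸ hq)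
        exact beq_iff_eq.mp this
      have hfold : pvFoldA (p :: rest) acc
          = rest'.foldl pvStep (p.1, 1 + run.length, p.2 :: run.map (·.2),
              acc ++ (if 2 ≤ run.length then p.2 :: run.map (·.2) else [])) := by
        show rest.foldl pvStep (p.1, 1, [p.2], acc) = _
        rw [hsplit, List.foldl_append, pv_run_fresh run p.1 p.2 acc hvrun]
      have hrc : run_cells (p :: rest)
          = if 3 ≤ run.length + 1 then PySem.Set.update (run_cells rest') ((p :: run).map (·.2))
            else run_cells rest' := by
        rw [run_cells]
      have hlen : rest'.length ≤ n := by
        have h1 : rest'.length ≤ rest.length := List.length_dropWhile_le _ _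
        simp only [List.length_cons] at hps
        omega
      match hre : rest' with
      | [] =>
        rw [hfold, hrc, hre]
        simp only [List.foldl_nil]
        by_cases h2 : 2 ≤ run.length
        · simp only [if_pos h2, if_pos (by omega : 3 ≤ run.length + 1)]
          simp [PySem.Set.mem_update, run_cells, PySem.Set.empty]
        · simp only [if_neg h2, if_neg (by omega : ¬ 3 ≤ run.length + 1)]
          simp [run_cells, PySem.Set.empty]
      | r :: rs =>
        have hrne : (r.1 == p.1) = false := by
          have := List.head?_dropWhile_not (fun q => q.1 == p.1) rest
          rw [← hrest', hre] at this
          simpa using this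
        have hstepr : ∀ acc2, pvStep (p.1, 1 + run.length, p.2 :: run.map (·.2), acc2) r
            = (r.1, 1, [r.2], acc2) := by
          intro acc2
          norm_num [pvStep, hrne]
        rw [hfold, hrc, hre]
        simp only [List.foldl_cons, hstepr]
        have : rs.foldl pvStep (r.1, 1, [r.2],
            acc ++ (if 2 ≤ run.length then p.2 :: run.map (·.2) else []))
            = pvFoldA (r :: rs) (acc ++ (if 2 ≤ run.length then p.2 :: run.map (·.2) else [])) := rfl
        rw [this, ih (r :: rs) (hre ▸ hlen) _ x]
        by_cases h2 : 2 ≤ run.length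
        · simp only [if_pos h2, if_pos (by omega : 3 ≤ run.length + 1)]
          simp [PySem.Set.mem_update]
          tauto
        · simp only [if_neg h2, if_neg (by omega : ¬ 3 ≤ run.length + 1)]
          simp

-- an outer loop that threads an accumulator through per-iteration extenders
theorem pv_mem_outer (l : List Int) (F : List (Int × Int) → Int → List (Int × Int))
    (S : Int → List (Int × Int))
    (h : ∀ acc i x, i ∈ l → (x ∈ F acc i ↔ x ∈ acc ∨ x ∈ S i)) :
    ∀ (init : List (Int × Int)) (x : Int × Int),
      (x ∈ l.foldl F init ↔ x ∈ init ∨ ∃ i ∈ l, x ∈ S i) := by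
  induction l with
  | nil => simp
  | cons j l ih =>
    intro init x
    simp only [List.foldl_cons]
    rw [ih (fun acc i x hi => h acc i x (List.mem_cons_of_mem _ hi)) (F init j) x,
      h init j x (List.mem_cons_self ..)]
    simp only [List.mem_cons]
    constructor
    · rintro ((h1 | h1) | ⟨i, hi, h2⟩)
      · exact Or.inl h1
      · exact Or.inr ⟨j, Or.inl rfl, h1⟩
      · exact Or.inr ⟨i, Or.inr hi, h2⟩
    · rintro (h1 | ⟨i, (rfl | hi), h2⟩)
      · exact Or.inl (Or.inl h1)
      · exact Or.inl (Or.inr h2)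
      · exact Or.inr ⟨i, hi, h2⟩

theorem pv_mem_helper1 (g : List (List Int)) (x : Int × Int) :
    x ∈ get_the_falling_elimination_index g
      ↔ ∃ i ∈ PySem.List.pyRange 0 (PySem.List.len g) 1, x ∈ run_cells (pvRowPairs g i) := by
  unfold get_the_falling_elimination_index
  rw [pv_mem_outer _ _ (fun i => run_cells (pvRowPairs g i)) ?_ [] x]
  · simp only [List.not_mem_nil, false_or]
  · intro acc i x _
    rw [pv_innerA]
    exact pv_mem_foldA _ _ (le_refl _) acc x

theorem pv_mem_helper2 (g : List (List Int)) (x : Int × Int) :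
    x ∈ get_the_falling_elimination_index_2 g
      ↔ ∃ k ∈ PySem.List.pyRange 0 (PySem.List.len (PySem.List.pyGetD g 0 [])) 1,
          x ∈ run_cells (pvColPairs g k) := by
  unfold get_the_falling_elimination_index_2
  rw [pv_mem_outer _ _ (fun k => run_cells (pvColPairs g k)) ?_ [] x]
  · simp only [List.not_mem_nil, false_or]
  · intro acc i x _
    rw [pv_innerA]
    exact pv_mem_foldA _ _ (le_refl _) acc x

-- generic or-accumulating fold
theorem pv_foldl_or {α : Type} (l : List α) (q : α → Bool) :
    ∀ b : Bool, l.foldl (fun fl a => fl || q a) b = (b || l.any q) := by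
  induction l with
  | nil => simp
  | cons a l ih =>
    intro b
    simp only [List.foldl_cons, List.any_cons, ih, Bool.or_assoc]

theorem pv_mem_map_snd_iff (l : List (Int × (Int × Int))) (x : Int × Int) :
    x ∈ l.map (·.2) ↔ ∃ j, j < l.length ∧ x = (l.getD j (0, (0, 0))).2 := by
  rw [List.mem_map]
  constructor
  · rintro ⟨q, hq, rfl⟩
    obtain ⟨j, hj, hjq⟩ := List.mem_iff_getElem.mp hq
    exact ⟨j, hj, by rw [List.getD_eq_getElem l _ hj, hjq]⟩
  · rintro ⟨j, hj, rfl⟩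
    exact ⟨l.getD j (0, (0, 0)), by rw [List.getD_eq_getElem l _ hj]; exact List.getElem_mem hj, rfl⟩

-- window characterization of run_cells membership
theorem pv_mem_run_cells_iff (n : Nat) :
    ∀ (l : List (Int × (Int × Int))), l.length ≤ n → ∀ (x : Int × Int),
      (x ∈ run_cells l ↔ ∃ j, j < l.length ∧ x = (l.getD j (0, (0, 0))).2 ∧ pvWin l j) := by
  induction n with
  | zero =>
    intro l hl x
    have : l = [] := List.eq_nil_of_length_eq_zero (by omega)
    subst this
    simp [run_cells, PySem.Set.empty]
  | succ n ih =>
    intro l hl x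
    match l with
    | [] => simp [run_cells, PySem.Set.empty]
    | p :: rest =>
      set run := rest.takeWhile (fun q => q.1 == p.1) with hrun
      set rest' := rest.dropWhile (fun q => q.1 == p.1) with hrest'
      have hsplit : rest = run ++ rest' := (List.takeWhile_append_dropWhile).symm
      have hvrun : ∀ q ∈ run, q.1 = p.1 := by
        intro q hq
        have := List.mem_takeWhile_imp (hrun ▸ hq)
        exact beq_iff_eq.mp this
      set m := run.length + 1 with hm
      have hl' : (p :: rest) = (p :: run) ++ rest' := by rw [hsplit]; rfl
      have hfrlen : (p :: run).length = m := by simp [hm]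
      have hLen : (p :: rest).length = m + rest'.length := by
        rw [hl', List.length_append, hfrlen]
      have hmle : m ≤ (p :: rest).length := by omega
      have G1 : ∀ t, t < m → (p :: rest).getD t (0, (0, 0)) = (p :: run).getD t (0, (0, 0)) := by
        intro t ht
        rw [hl']
        exact List.getD_append _ _ _ _ (by omega)
      have G2 : ∀ t, (p :: rest).getD (m + t) (0, (0, 0)) = rest'.getD t (0, (0, 0)) := by
        intro t
        rw [hl', List.getD_append_right _ _ _ _ (by omega)]
        congr 1
        omega
      have V1 : ∀ t, t < m → ((p :: rest).getD t (0, (0, 0))).1 = p.1 := by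
        intro t ht
        rw [G1 t ht]
        have hmem : (p :: run).getD t (0, (0, 0)) ∈ (p :: run) := by
          rw [List.getD_eq_getElem _ _ (by omega)]
          exact List.getElem_mem (by omega)
        rcases List.mem_cons.mp hmem with h | h
        · rw [h]
        · exact hvrun _ h
      have V2 : m < (p :: rest).length → ((p :: rest).getD m (0, (0, 0))).1 ≠ p.1 := by
        intro hmlt
        have h0 : (p :: rest).getD m (0, (0, 0)) = rest'.getD 0 (0, (0, 0)) := by
          have := G2 0
          simpa using this
        rw [h0]
        have hne : rest' ≠ [] := by
          intro h
          rw [h, List.length_nil] at hLen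
          omega
        obtain ⟨r, rs, hre⟩ := List.exists_cons_of_ne_nil hne
        have hh := List.head?_dropWhile_not (fun q => q.1 == p.1) rest
        rw [← hrest', hre] at hh
        simp at hh
        rw [hre]
        simpa using hh
      have K1 : ∀ j, j < m → (pvWin (p :: rest) j ↔ 3 ≤ m) := by
        intro j hj
        constructor
        · rintro ⟨t, ht1, ht2, ht3, he1, he2⟩
          by_cases hc : t + 2 < m
          · omega
          · exfalso
            have hmlt : m < (p :: rest).length := by omega
            rcases (by omega : m = t + 1 ∨ m = t + 2) with h | h
            · apply V2 hmlt
              rw [h, ← he1]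
              exact V1 t (by omega)
            · apply V2 hmlt
              rw [h, ← he2]
              exact V1 (t + 1) (by omega)
        · intro h3
          by_cases hc : j + 2 < m
          · exact ⟨j, le_refl _, by omega, by omega,
              by rw [V1 j (by omega), V1 (j + 1) (by omega)],
              by rw [V1 (j + 1) (by omega), V1 (j + 2) (by omega)]⟩
          · refine ⟨m - 3, by omega, by omega, by omega, ?_, ?_⟩
            · rw [V1 (m - 3) (by omega), V1 (m - 3 + 1) (by omega)]
            · rw [V1 (m - 3 + 1) (by omega), V1 (m - 3 + 2) (by omega)]
      have K2 : ∀ j, m ≤ j → (pvWin (p :: rest) j ↔ pvWin rest' (j - m)) := by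
        intro j hj
        constructor
        · rintro ⟨t, ht1, ht2, ht3, he1, he2⟩
          by_cases hc : t < m
          · exfalso
            have hmlt : m < (p :: rest).length := by omega
            rcases (by omega : m = t + 1 ∨ m = t + 2) with h | h
            · apply V2 hmlt
              rw [h, ← he1]
              exact V1 t (by omega)
            · apply V2 hmlt
              rw [h, ← he2]
              exact V1 (t + 1) (by omega)
          · refine ⟨t - m, by omega, by omega, by omega, ?_, ?_⟩
            · have e0 := G2 (t - m)
              have e1 := G2 (t - m + 1)
              rw [show m + (t - m) = t by omega] at e0
              rw [show m + (t - m + 1) = t + 1 by omega] at e1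
              rw [← e0, ← e1]
              exact he1
            · have e1 := G2 (t - m + 1)
              have e2 := G2 (t - m + 2)
              rw [show m + (t - m + 1) = t + 1 by omega] at e1
              rw [show m + (t - m + 2) = t + 2 by omega] at e2
              rw [← e1, ← e2]
              exact he2
        · rintro ⟨t, ht1, ht2, ht3, he1, he2⟩
          refine ⟨m + t, by omega, by omega, by omega, ?_, ?_⟩
          · rw [G2 t, show m + t + 1 = m + (t + 1) by omega, G2 (t + 1)]
            exact he1
          · rw [show m + t + 1 = m + (t + 1) by omega, G2 (t + 1),
              show m + t + 2 = m + (t + 2) by omega, G2 (t + 2)]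
            exact he2
      have hlenr : rest'.length ≤ n := by
        have h1 : rest'.length ≤ rest.length := List.length_dropWhile_le _ _
        simp only [List.length_cons] at hl
        omega
      have hrc : run_cells (p :: rest)
          = if 3 ≤ run.length + 1 then PySem.Set.update (run_cells rest') ((p :: run).map (·.2))
            else run_cells rest' := by
        rw [run_cells]
      have hRHS : (∃ j, j < (p :: rest).length ∧ x = ((p :: rest).getD j (0, (0, 0))).2 ∧ pvWin (p :: rest) j)
          ↔ (3 ≤ m ∧ x ∈ (p :: run).map (·.2)) ∨ x ∈ run_cells rest' := by
        constructor
        · rintro ⟨j, hjlen, hx, hw⟩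
          by_cases hjm : j < m
          · refine Or.inl ⟨(K1 j hjm).mp hw, ?_⟩
            rw [pv_mem_map_snd_iff]
            exact ⟨j, by omega, by rw [hx, G1 j hjm]⟩
          · refine Or.inr ?_
            rw [ih rest' hlenr x]
            refine ⟨j - m, by omega, ?_, (K2 j (by omega)).mp hw⟩
            have := G2 (j - m)
            rw [show m + (j - m) = j by omega] at this
            rw [hx, this]
        · rintro (⟨h3, hmem⟩ | hmem)
          · obtain ⟨j, hj, hx⟩ := (pv_mem_map_snd_iff _ x).mp hmem
            rw [hfrlen] at hj
            exact ⟨j, by omega, by rw [hx, G1 j hj], (K1 j hj).mpr h3⟩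
          · obtain ⟨j, hj, hx, hw⟩ := (ih rest' hlenr x).mp hmem
            refine ⟨m + j, by omega, by rw [G2 j, hx], ?_⟩
            rw [K2 (m + j) (by omega)]
            simpa using hw
      rw [hrc, hRHS]
      by_cases h3 : 3 ≤ run.length + 1
      · rw [if_pos h3, PySem.Set.mem_update]
        have h3' : 3 ≤ m := by omega
        constructor
        · rintro (h | h)
          · exact Or.inr h
          · exact Or.inl ⟨h3', h⟩
        · rintro (⟨_, h⟩ | h)
          · exact Or.inr h
          · exact Or.inl h
      · rw [if_neg h3]
        have h3' : ¬ 3 ≤ m := by omega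
        constructor
        · exact Or.inr
        · rintro (⟨h, _⟩ | h)
          · exact absurd h h3'
          · exact h

-- the window predicate on a (value, coord) sequence built from a range = B's stencil test
theorem pv_win_iff_triple (vf : Int → Int) (cf : Int → Int × Int) (m : Int) (jn : Nat)
    (hj : (jn : Int) < m) :
    pvWin ((PySem.List.pyRange 0 m 1).map (fun k => (vf k, cf k))) jn ↔
      pvInTriple vf m (jn : Int) = true := by
  have hL : ((PySem.List.pyRange 0 m 1).map (fun k => (vf k, cf k))).length = m.toNat := by
    simp [PySem.List.length_pyRange_one]
  have hget : ∀ t, t < m.toNat →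
      ((PySem.List.pyRange 0 m 1).map (fun k => (vf k, cf k))).getD t (0, (0, 0))
        = (vf (t : Int), cf (t : Int)) := by
    intro t ht
    rw [List.getD_eq_getElem _ _ (by omega)]
    rw [List.getElem_map]
    rw [PySem.List.getElem_pyRange_one]
    simp
  constructor
  · rintro ⟨t, ht1, ht2, ht3, he1, he2⟩
    rw [hL] at ht3
    rw [hget t (by omega), hget (t + 1) (by omega)] at he1
    rw [hget (t + 1) (by omega), hget (t + 2) (by omega)] at he2
    have e1' : vf (t : Int) = vf ((t : Int) + 1) := by
      push_cast at he1
      simpa using he1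
    have e2' : vf ((t : Int) + 1) = vf ((t : Int) + 2) := by
      push_cast at he2
      simpa using he2
    simp only [pvInTriple, List.any_cons, List.any_nil, Bool.or_false, Bool.or_eq_true,
      Bool.and_eq_true, decide_eq_true_eq, beq_iff_eq]
    rcases (by omega : (t : Int) = (jn : Int) - 2 ∨ (t : Int) = (jn : Int) - 1 ∨ (t : Int) = (jn : Int))
      with h | h | h
    · exact Or.inl ⟨⟨by omega, by omega⟩, by rw [← h]; exact e1', by rw [← h]; exact e2'⟩
    · exact Or.inr (Or.inl ⟨⟨by omega, by omega⟩, by rw [← h]; exact e1', by rw [← h]; exact e2'⟩)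
    · exact Or.inr (Or.inr ⟨⟨by omega, by omega⟩, by rw [← h]; exact e1', by rw [← h]; exact e2'⟩)
  · intro h
    simp only [pvInTriple, List.any_cons, List.any_nil, Bool.or_false, Bool.or_eq_true,
      Bool.and_eq_true, decide_eq_true_eq, beq_iff_eq] at h
    have key : ∀ tI : Int, 0 ≤ tI → (jn : Int) - 2 ≤ tI → tI ≤ (jn : Int) → tI + 2 < m →
        vf tI = vf (tI + 1) → vf (tI + 1) = vf (tI + 2) →
        pvWin ((PySem.List.pyRange 0 m 1).map (fun k => (vf k, cf k))) jn := by
      intro tI h0 hlo hhi hlt e1 e2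
      refine ⟨tI.toNat, by omega, by omega, by omega, ?_, ?_⟩
      · rw [hget tI.toNat (by omega), hget (tI.toNat + 1) (by omega)]
        rw [show ((tI.toNat : Nat) : Int) = tI by omega, show ((tI.toNat + 1 : Nat) : Int) = tI + 1 by omega]
        exact e1
      · rw [hget (tI.toNat + 1) (by omega), hget (tI.toNat + 2) (by omega)]
        rw [show ((tI.toNat + 1 : Nat) : Int) = tI + 1 by omega, show ((tI.toNat + 2 : Nat) : Int) = tI + 2 by omega]
        exact e2
    rcases h with ⟨⟨h0, hlt⟩, e1, e2⟩ | ⟨⟨h0, hlt⟩, e1, e2⟩ | ⟨⟨h0, hlt⟩, e1, e2⟩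
    · exact key ((jn : Int) - 2) h0 (by omega) (by omega) (by omega) e1 e2
    · exact key ((jn : Int) - 1) h0 (by omega) (by omega) (by omega) e1 e2
    · exact key (jn : Int) h0 (by omega) (by omega) (by omega) e1 e2

-- the coordinate stored at position t of such a sequence
theorem pv_coord_range (vf : Int → Int) (cf : Int → Int × Int) (m : Int) (t : Nat)
    (ht : t < m.toNat) :
    (((PySem.List.pyRange 0 m 1).map (fun k => (vf k, cf k))).getD t (0, (0, 0))).2 = cf (t : Int) := by
  have hL : ((PySem.List.pyRange 0 m 1).map (fun k => (vf k, cf k))).length = m.toNat := by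
    simp [PySem.List.length_pyRange_one]
  rw [List.getD_eq_getElem _ _ (by omega), List.getElem_map, PySem.List.getElem_pyRange_one]
  simp

theorem pv_len_pairs (vf : Int → Int) (cf : Int → Int × Int) (m : Int) :
    ((PySem.List.pyRange 0 m 1).map (fun k => (vf k, cf k))).length = m.toNat := by
  simp [PySem.List.length_pyRange_one]

-- membership in A's index1 / index2 lists as a per-cell stencil condition
theorem pv_mem_I1 (g : List (List Int)) (x : Int × Int) :
    x ∈ get_the_falling_elimination_index g
      ↔ ∃ i j : Int, 0 ≤ i ∧ i < PySem.List.len g ∧ 0 ≤ j ∧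
          j < PySem.List.len (PySem.List.pyGetD g 0 []) ∧ x = (i, j) ∧
          pvInTriple (fun t => PySem.List.pyGetD (PySem.List.pyGetD g i []) t 0)
            (PySem.List.len (PySem.List.pyGetD g 0 [])) j = true := by
  rw [pv_mem_helper1]
  set w := PySem.List.len (PySem.List.pyGetD g 0 []) with hw
  constructor
  · rintro ⟨i, hi, hmem⟩
    obtain ⟨hi1, hi2⟩ := PySem.List.mem_pyRange_one.mp hi
    obtain ⟨j, hj, hx, hwin⟩ :=
      (pv_mem_run_cells_iff (pvRowPairs g i).length (pvRowPairs g i) (le_refl _) x).mp hmem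
    rw [pvRowPairs] at hj hx hwin
    rw [pv_len_pairs] at hj
    refine ⟨i, (j : Int), hi1, hi2, by omega, by omega, ?_, ?_⟩
    · rw [hx, pv_coord_range _ _ _ _ hj]
    · exact (pv_win_iff_triple _ _ _ _ (by omega)).mp hwin
  · rintro ⟨i, j, hi1, hi2, hj1, hj2, hx, htr⟩
    refine ⟨i, PySem.List.mem_pyRange_one.mpr ⟨hi1, hi2⟩, ?_⟩
    rw [pv_mem_run_cells_iff (pvRowPairs g i).length (pvRowPairs g i) (le_refl _) x]
    refine ⟨j.toNat, ?_, ?_, ?_⟩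
    · rw [pvRowPairs, pv_len_pairs]; omega
    · rw [pvRowPairs, pv_coord_range _ _ _ _ (by rw [← hw]; omega)]
      rw [hx, show ((j.toNat : Nat) : Int) = j by omega]
    · rw [pvRowPairs]
      rw [pv_win_iff_triple _ _ _ _ (by rw [← hw]; omega)]
      rw [show ((j.toNat : Nat) : Int) = j by omega]
      exact htr

theorem pv_mem_I2 (g : List (List Int)) (x : Int × Int) :
    x ∈ get_the_falling_elimination_index_2 g
      ↔ ∃ i j : Int, 0 ≤ i ∧ i < PySem.List.len g ∧ 0 ≤ j ∧
          j < PySem.List.len (PySem.List.pyGetD g 0 []) ∧ x = (i, j) ∧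
          pvInTriple (fun t => PySem.List.pyGetD (PySem.List.pyGetD g t []) j 0)
            (PySem.List.len g) i = true := by
  rw [pv_mem_helper2]
  constructor
  · rintro ⟨k, hk, hmem⟩
    obtain ⟨hk1, hk2⟩ := PySem.List.mem_pyRange_one.mp hk
    obtain ⟨t, ht, hx, hwin⟩ :=
      (pv_mem_run_cells_iff (pvColPairs g k).length (pvColPairs g k) (le_refl _) x).mp hmem
    rw [pvColPairs] at ht hx hwin
    rw [pv_len_pairs] at ht
    refine ⟨(t : Int), k, by omega, by omega, hk1, hk2, ?_, ?_⟩
    · rw [hx, pv_coord_range _ _ _ _ ht]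
    · exact (pv_win_iff_triple _ _ _ _ (by omega)).mp hwin
  · rintro ⟨i, j, hi1, hi2, hj1, hj2, hx, htr⟩
    refine ⟨j, PySem.List.mem_pyRange_one.mpr ⟨hj1, hj2⟩, ?_⟩
    rw [pv_mem_run_cells_iff (pvColPairs g j).length (pvColPairs g j) (le_refl _) x]
    refine ⟨i.toNat, ?_, ?_, ?_⟩
    · rw [pvColPairs, pv_len_pairs]; omega
    · rw [pvColPairs, pv_coord_range _ _ _ _ (by omega)]
      rw [hx, show ((i.toNat : Nat) : Int) = i by omega]
    · rw [pvColPairs]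
      rw [pv_win_iff_triple _ _ _ _ (by omega)]
      rw [show ((i.toNat : Nat) : Int) = i by omega]
      exact htr

theorem pv_foldl_if_or (l : List (Int × Int)) (q : Int × Int → Bool) :
    ∀ b : Bool, l.foldl (fun fl a => if q a then true else fl) b = (b || l.any q) := by
  induction l with
  | nil => simp
  | cons a l ih =>
    intro b
    simp only [List.foldl_cons, List.any_cons, ih]
    cases hq : q a <;> simp

-- A's quadratic intersection loop is a double any
theorem pv_flagA (l1 l2 : List (Int × Int)) :
    ((PySem.List.pyRange 0 (PySem.List.len l1) 1).foldl
        (fun fl i => (PySem.List.pyRange 0 (PySem.List.len l2) 1).foldl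
          (fun fl j =>
            if PySem.List.pyGetD l1 i (0, 0) == PySem.List.pyGetD l2 j (0, 0) then true else fl)
          fl)
        false) = l1.any (fun a => l2.any (fun b => a == b)) := by
  have hin : ∀ (fl : Bool) (a : Int × Int),
      (PySem.List.pyRange 0 (PySem.List.len l2) 1).foldl
        (fun fl j => if a == PySem.List.pyGetD l2 j (0, 0) then true else fl) fl
      = (fl || l2.any (fun b => a == b)) := by
    intro fl a
    rw [PySem.List.len_eq l2,
      PySem.List.foldl_pyRange_zero_pyGetD' l2 (0, 0)
        (f := fun fl b => if a == b then true else fl)]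
    exact pv_foldl_if_or l2 (fun b => a == b) fl
  have hbody : ∀ (fl : Bool), ∀ i ∈ PySem.List.pyRange 0 (PySem.List.len l1) 1,
      (PySem.List.pyRange 0 (PySem.List.len l2) 1).foldl
        (fun fl j =>
          if PySem.List.pyGetD l1 i (0, 0) == PySem.List.pyGetD l2 j (0, 0) then true else fl)
        fl
      = (fl || l2.any (fun b => PySem.List.pyGetD l1 i (0, 0) == b)) := by
    intro fl i _
    exact hin fl (PySem.List.pyGetD l1 i (0, 0))
  rw [PySem.List.foldl_congr_mem _ _
    (fun fl i => fl || l2.any (fun b => PySem.List.pyGetD l1 i (0, 0) == b)) _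
    (fun acc x hx => hbody acc x hx)]
  rw [PySem.List.len_eq l1,
    PySem.List.foldl_pyRange_zero_pyGetD' l1 (0, 0)
      (f := fun fl a => fl || l2.any (fun b => a == b))]
  rw [pv_foldl_or l1 (fun a => l2.any (fun b => a == b)) false]
  simp

-- B's per-cell flag fold is a double any of the stencil condition
theorem pv_flagB (h w : Int) (cond : Int → Int → Bool) :
    ((PySem.List.pyRange 0 h 1).foldl
        (fun (b : Bool) i => (PySem.List.pyRange 0 w 1).foldl
          (fun (b : Bool) j => b || cond i j) b)
        false)
      = (PySem.List.pyRange 0 h 1).any (fun i => (PySem.List.pyRange 0 w 1).any (cond i)) := by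
  have hbody : ∀ (b : Bool), ∀ i ∈ PySem.List.pyRange 0 h 1,
      (PySem.List.pyRange 0 w 1).foldl (fun (b : Bool) j => b || cond i j) b
        = (b || (PySem.List.pyRange 0 w 1).any (cond i)) := by
    intro b i _
    exact pv_foldl_or _ (cond i) b
  rw [PySem.List.foldl_congr_mem _ _
    (fun b i => b || (PySem.List.pyRange 0 w 1).any (cond i)) _
    (fun acc x hx => hbody acc x hx)]
  rw [pv_foldl_or _ (fun i => (PySem.List.pyRange 0 w 1).any (cond i)) false]
  simp

theorem pv_ports_eq (g : List (List Int)) : caculate_the_score g = caculate_the_score_alt g := by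
  unfold caculate_the_score caculate_the_score_alt
  dsimp only
  set h := PySem.List.len g with hh
  set w := PySem.List.len (PySem.List.pyGetD g 0 []) with hw
  set rowGet := fun (i t : Int) => PySem.List.pyGetD (PySem.List.pyGetD g i []) t 0 with hrowGet
  set cond := fun (i j : Int) =>
    pvInTriple (fun t => rowGet i t) w j && pvInTriple (fun t => rowGet t j) h i with hcond
  -- decompose B's fold into the count fold and the flag fold
  have hbody : ∀ (i : Int),
      (fun (st : Int × Bool) j =>
        let st := if rowGet i j == -1 then (st.1 + 1, st.2) else st
        if !st.2 && pvInTriple (fun t => rowGet i t) w j && pvInTriple (fun t => rowGet t j) h i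
        then (st.1, true) else st)
      = fun (st : Int × Bool) j =>
          ((if rowGet i j == -1 then st.1 + 1 else st.1), st.2 || cond i j) := by
    intro i
    funext st j
    obtain ⟨s, b⟩ := st
    simp only [hcond]
    cases b <;> cases hc1 : (rowGet i j == -1) <;>
      cases hc2 : pvInTriple (fun t => rowGet i t) w j <;>
      cases hc3 : pvInTriple (fun t => rowGet t j) h i <;>
        simp_all
  have hinner : ∀ (st : Int × Bool) (i : Int),
      (PySem.List.pyRange 0 w 1).foldl
        (fun (st : Int × Bool) j =>
          let st := if rowGet i j == -1 then (st.1 + 1, st.2) else st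
          if !st.2 && pvInTriple (fun t => rowGet i t) w j && pvInTriple (fun t => rowGet t j) h i
          then (st.1, true) else st)
        st
      = ((PySem.List.pyRange 0 w 1).foldl
          (fun s j => if rowGet i j == -1 then s + 1 else s) st.1,
         (PySem.List.pyRange 0 w 1).foldl (fun b j => b || cond i j) st.2) := by
    intro st i
    rw [hbody i]
    rw [show st = (st.1, st.2) from rfl]
    rw [PySem.List.foldl_prod_mk
      (f := fun s j => if rowGet i j == -1 then s + 1 else s)
      (g := fun b j => b || cond i j)]
  have houter :
      (PySem.List.pyRange 0 h 1).foldl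
        (fun (st : Int × Bool) i =>
          (PySem.List.pyRange 0 w 1).foldl
            (fun (st : Int × Bool) j =>
              let st := if rowGet i j == -1 then (st.1 + 1, st.2) else st
              if !st.2 && pvInTriple (fun t => rowGet i t) w j && pvInTriple (fun t => rowGet t j) h i
              then (st.1, true) else st)
            st)
        ((0 : Int), false)
      = ((PySem.List.pyRange 0 h 1).foldl
          (fun s i => (PySem.List.pyRange 0 w 1).foldl
            (fun s j => if rowGet i j == -1 then s + 1 else s) s) 0,
         (PySem.List.pyRange 0 h 1).foldl
          (fun b i => (PySem.List.pyRange 0 w 1).foldl (fun b j => b || cond i j) b) false) := by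
    rw [PySem.List.foldl_congr_mem _ _
      (fun (st : Int × Bool) i =>
        ((PySem.List.pyRange 0 w 1).foldl
          (fun s j => if rowGet i j == -1 then s + 1 else s) st.1,
         (PySem.List.pyRange 0 w 1).foldl (fun b j => b || cond i j) st.2)) _
      (fun st i _ => hinner st i)]
    rw [PySem.List.foldl_prod_mk
      (f := fun s i => (PySem.List.pyRange 0 w 1).foldl
        (fun s j => if rowGet i j == -1 then s + 1 else s) s)
      (g := fun b i => (PySem.List.pyRange 0 w 1).foldl (fun b j => b || cond i j) b)]
  rw [houter]
  dsimp only
  -- the two overlap flags agree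
  have hAB :
      (get_the_falling_elimination_index g).any
          (fun a => (get_the_falling_elimination_index_2 g).any (fun b => a == b))
        = (PySem.List.pyRange 0 h 1).any (fun i => (PySem.List.pyRange 0 w 1).any (cond i)) := by
    have hiff :
        ((get_the_falling_elimination_index g).any
            (fun a => (get_the_falling_elimination_index_2 g).any (fun b => a == b)) = true)
          ↔ ((PySem.List.pyRange 0 h 1).any (fun i => (PySem.List.pyRange 0 w 1).any (cond i)) = true) := by
      rw [List.any_eq_true]
      constructor
      · rintro ⟨a, ha1, ha2⟩
        rw [List.any_eq_true] at ha2
        obtain ⟨b, hb1, hab⟩ := ha2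
        have hab' : a = b := by simpa using hab
        subst hab'
        obtain ⟨i, j, hi1, hi2, hj1, hj2, hx, htr1⟩ := (pv_mem_I1 g a).mp ha1
        obtain ⟨i', j', hi1', hi2', hj1', hj2', hx', htr2⟩ := (pv_mem_I2 g a).mp hb1
        rw [hx] at hx'
        injection hx' with h1 h2
        rw [List.any_eq_true]
        refine ⟨i, PySem.List.mem_pyRange_one.mpr ⟨hi1, hi2⟩, ?_⟩
        rw [List.any_eq_true]
        refine ⟨j, PySem.List.mem_pyRange_one.mpr ⟨hj1, hj2⟩, ?_⟩
        rw [hcond]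
        simp only [Bool.and_eq_true]
        constructor
        · exact htr1
        · rw [h1, h2]
          exact htr2
      · intro hex
        rw [List.any_eq_true] at hex
        obtain ⟨i, hi, hex⟩ := hex
        rw [List.any_eq_true] at hex
        obtain ⟨j, hj, hc⟩ := hex
        obtain ⟨hi1, hi2⟩ := PySem.List.mem_pyRange_one.mp hi
        obtain ⟨hj1, hj2⟩ := PySem.List.mem_pyRange_one.mp hj
        rw [hcond] at hc
        simp only [Bool.and_eq_true] at hc
        refine ⟨(i, j), ?_, ?_⟩
        · exact (pv_mem_I1 g (i, j)).mpr ⟨i, j, hi1, hi2, hj1, hj2, rfl, hc.1⟩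
        · rw [List.any_eq_true]
          refine ⟨(i, j), (pv_mem_I2 g (i, j)).mpr ⟨i, j, hi1, hi2, hj1, hj2, rfl, hc.2⟩, by simp⟩
    exact Bool.eq_iff_iff.mpr hiff
  rw [pv_flagA, pv_flagB, hAB]

-- ===== VERDICT (by name: the statement is the Claim_ definition above) =====
theorem caculate_the_score_spec : Claim_equal_caculate_the_score := by
  intro g _ _
  unfold Spec_caculate_the_score
  exact pv_ports_eq g
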